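-- pv_equiv track=rewrite | github.com/JunsangKwon/Algorithm_Study | Programmers/문자열 다루기 기본.py | solution
-- ===== SOURCE A (Python) =====
-- def solution(s):
--     answer = True
--     if(len(s) == 4 or len(s) == 6):
--         for i in s:
--             if ord(i) < 48 or ord(i) > 57:
--                 answer = False
--     else:
--         answer = False
--     return answer
-- ===== SOURCE B (Python) =====
-- import re
--
-- def solution(s):
--     return bool(re.fullmatch(r'\d{4}|\d{6}', s, re.ASCII))
-- ===== Notes on version B (the rewrite author's own statement) =====
-- stated objective: idiomatic
-- what changed: Replaces the explicit length branch plus per-character ord-range flag loop by a single anchored regex full-match of \d{4}|\d{6} (ASCII mode), validating length and digit content in one pattern-matching pass.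
import Mathlib
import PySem

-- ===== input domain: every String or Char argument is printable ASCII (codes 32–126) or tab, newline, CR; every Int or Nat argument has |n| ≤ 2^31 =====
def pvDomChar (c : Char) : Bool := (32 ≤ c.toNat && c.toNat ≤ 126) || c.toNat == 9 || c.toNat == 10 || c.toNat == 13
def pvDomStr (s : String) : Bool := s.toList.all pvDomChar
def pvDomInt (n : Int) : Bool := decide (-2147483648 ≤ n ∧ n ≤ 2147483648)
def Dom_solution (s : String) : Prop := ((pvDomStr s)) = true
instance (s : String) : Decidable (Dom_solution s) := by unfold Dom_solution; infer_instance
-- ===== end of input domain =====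

-- B replaces A's length branch and per-character ord-flag loop by one anchored regex
-- full-match of \d{4}|\d{6} in ASCII mode (idiomatic; same cost).

-- ===== PORT A =====
def solution (s : String) : Bool :=
  -- answer = True; if len(s)==4 or len(s)==6: for i in s: non-digit sets answer=False; else answer=False
  if PySem.Str.len s = 4 ∨ PySem.Str.len s = 6 then
    s.toList.foldl (fun answer i =>
      if i.toNat < 48 ∨ i.toNat > 57 then false else answer) true
  else false

-- ===== PORT B =====
-- Port of re.fullmatch(r'\d{4}|\d{6}', s, re.ASCII): with re.ASCII, \d is exactly [0-9].
-- pvMatchDigits n cs consumes exactly n ASCII digits, returning the remaining input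
-- (the regex engine's position after the counted-repetition node), or none on failure.
def pvMatchDigits : Nat → List Char → Option (List Char)
  | 0, rest => some rest
  | _ + 1, [] => none
  | n + 1, c :: rest =>
      if 48 ≤ c.toNat ∧ c.toNat ≤ 57 then pvMatchDigits n rest else none

-- Alternation: try \d{4} against the whole input, then \d{6}; fullmatch requires the
-- branch to consume the entire string.
def solution_alt (s : String) : Bool :=
  (match pvMatchDigits 4 s.toList with | some [] => true | _ => false)
  || (match pvMatchDigits 6 s.toList with | some [] => true | _ => false)

-- ===== PRECONDITION & SPEC =====
def Spec_solution (s : String) (out : Bool) : Prop := out = solution_alt s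
instance (s : String) (out : Bool) : Decidable (Spec_solution s out) := by unfold Spec_solution; infer_instance

-- ===== CLAIM (what is proved, stated in full; the proofs are below) =====
def Claim_equal_solution : Prop := ∀ (s : String), Dom_solution s → Spec_solution s (solution s)

-- ===== LEMMAS AND PROOFS =====

def pvIsDig (c : Char) : Bool := decide (48 ≤ c.toNat) && decide (c.toNat ≤ 57)

-- B's digit-consumer succeeds on the whole input iff the length is n and all chars are digits.
lemma matchDigits_some_nil (n : Nat) (cs : List Char) :
    (pvMatchDigits n cs = some []) ↔ (cs.length = n ∧ cs.all pvIsDig = true) := by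
  induction n generalizing cs with
  | zero =>
    cases cs with
    | nil => simp [pvMatchDigits]
    | cons c cs => simp [pvMatchDigits]
  | succ n ih =>
    cases cs with
    | nil => simp [pvMatchDigits]
    | cons c cs =>
      by_cases h : 48 ≤ c.toNat ∧ c.toNat ≤ 57
      · have hd : pvIsDig c = true := by simp [pvIsDig]; omega
        simp [pvMatchDigits, h, ih, hd]
      · have hd : pvIsDig c = false := by simp [pvIsDig]; omega
        simp [pvMatchDigits, h, hd]

-- A's flag-carrying fold equals "initial flag AND every char is a digit".
lemma foldA_eq_all (cs : List Char) (b : Bool) :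
    cs.foldl (fun answer i => if i.toNat < 48 ∨ i.toNat > 57 then false else answer) b
      = (b && cs.all pvIsDig) := by
  induction cs generalizing b with
  | nil => simp
  | cons c cs ih =>
    simp only [List.foldl_cons, List.all_cons, ih]
    by_cases h : c.toNat < 48 ∨ c.toNat > 57
    · have hd : pvIsDig c = false := by simp [pvIsDig]; omega
      simp [h, hd]
    · have hd : pvIsDig c = true := by simp [pvIsDig]; omega
      simp [h, hd]

lemma alt_branch (n : Nat) (cs : List Char) :
    (match pvMatchDigits n cs with | some [] => true | _ => false)
      = (decide (cs.length = n) && cs.all pvIsDig) := by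
  by_cases h : pvMatchDigits n cs = some []
  · rw [h]
    have := (matchDigits_some_nil n cs).mp h
    simp [this.1, this.2]
  · have hne : ¬ (cs.length = n ∧ cs.all pvIsDig = true) :=
      fun hc => h ((matchDigits_some_nil n cs).mpr hc)
    have : (decide (cs.length = n) && cs.all pvIsDig) = false := by
      by_cases hl : cs.length = n
      · have : cs.all pvIsDig = false := by
          cases hall : cs.all pvIsDig
          · rfl
          · exact absurd ⟨hl, hall⟩ hne
        simp [this]
      · simp [hl]
    rw [this]
    cases hm : pvMatchDigits n cs with
    | none => rfl
    | some rest => cases rest with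
      | nil => exact absurd hm h
      | cons a l => rfl

-- ===== VERDICT (by name: the statement is the Claim_ definition above) =====
theorem solution_spec : Claim_equal_solution := by
  intro s _
  show solution s = solution_alt s
  simp only [solution, solution_alt, foldA_eq_all, Bool.true_and, alt_branch,
    PySem.Str.len_eq, String.length_toList]
  have e4 : ((s.length : Int) = 4) ↔ s.length = 4 := by omega
  have e6 : ((s.length : Int) = 6) ↔ s.length = 6 := by omega
  by_cases h4 : s.length = 4 <;> by_cases h6 : s.length = 6 <;>
    simp [e4, e6, h4, h6] <;> omega
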